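-- pv_equiv track=rewrite | github.com/Habosjob/Vibe | bond_screener/src/moex_rates.py | _detect_moex_header_row
-- ===== SOURCE A (Python) =====
-- def _detect_moex_header_row(text: str, max_rows: int = 50) -> int:
--     lines = text.splitlines()
--     for idx, line in enumerate(lines[:max_rows]):
--         upper_line = line.upper()
--         if "SECID" in upper_line and ("ISIN" in upper_line or ";SECID;" in f";{upper_line};"):
--             return idx
--     for idx, line in enumerate(lines[:max_rows]):
--         if "SECID" in line.upper():
--             return idx
--     return 0
-- ===== SOURCE B (Python) =====
-- def _detect_moex_header_row(text: str, max_rows: int = 50) -> int: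
--     weak = -1
--     for idx, line in enumerate(text.splitlines()[:max_rows]):
--         upper_line = line.upper()
--         if "SECID" in upper_line and ("ISIN" in upper_line or ";SECID;" in f";{upper_line};"):
--             return idx
--         if weak < 0 and "SECID" in upper_line:
--             weak = idx
--     return weak if weak >= 0 else 0
-- ===== Notes on version B (the rewrite author's own statement) =====
-- stated objective: alternative
-- what changed: Replaces A's two sequential scans by a single pass that returns immediately on a strong SECID match while maintaining the first weak SECID index in a sentinel variable.
import Mathlib
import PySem

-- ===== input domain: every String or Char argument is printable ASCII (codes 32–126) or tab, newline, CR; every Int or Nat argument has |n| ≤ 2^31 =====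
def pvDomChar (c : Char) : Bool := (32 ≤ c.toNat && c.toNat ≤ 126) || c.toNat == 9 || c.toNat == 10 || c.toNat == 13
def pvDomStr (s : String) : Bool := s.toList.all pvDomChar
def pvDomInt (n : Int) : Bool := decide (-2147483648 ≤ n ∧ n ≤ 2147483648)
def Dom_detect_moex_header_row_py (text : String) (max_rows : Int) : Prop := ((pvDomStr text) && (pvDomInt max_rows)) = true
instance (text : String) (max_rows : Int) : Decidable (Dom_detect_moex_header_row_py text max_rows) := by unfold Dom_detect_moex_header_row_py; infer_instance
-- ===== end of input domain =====

-- B replaces A's two sequential scans by a single pass that keeps the first weak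
-- SECID index in a sentinel while returning immediately on a strong match (alternative decomposition).

-- ===== PORT A =====
-- the strong header condition (the condition of A's first loop, and of B's early return)
def pvStrong (u : String) : Bool :=
  PySem.Str.isIn "SECID" u &&
    (PySem.Str.isIn "ISIN" u || PySem.Str.isIn ";SECID;" (";" ++ u ++ ";"))

-- A's first loop
def pvLoop1A : List (Int × String) → Option Int
  | [] => none
  | (idx, line) :: rest =>
    let u := PySem.Str.upper line
    if pvStrong u then some idx else pvLoop1A rest

-- A's second loop
def pvLoop2A : List (Int × String) → Option Int
  | [] => none
  | (idx, line) :: rest =>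
    if PySem.Str.isIn "SECID" (PySem.Str.upper line) then some idx else pvLoop2A rest

def detect_moex_header_row_py (text : String) (max_rows : Int) : Int :=
  let lines := PySem.Str.splitlines text
  let pref := PySem.List.slice lines none (some max_rows)
  match pvLoop1A (PySem.List.enumerate pref 0) with
  | some i => i
  | none =>
    match pvLoop2A (PySem.List.enumerate pref 0) with
    | some i => i
    | none => 0

-- ===== PORT B =====
-- B's single loop, carrying the first weak SECID index (sentinel -1)
def pvLoopB : List (Int × String) → Int → Int
  | [], weak => if 0 ≤ weak then weak else 0
  | (idx, line) :: rest, weak =>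
    let u := PySem.Str.upper line
    if pvStrong u then idx
    else pvLoopB rest (if weak < 0 && PySem.Str.isIn "SECID" u then idx else weak)

def detect_moex_header_row_py_alt (text : String) (max_rows : Int) : Int :=
  pvLoopB
    (PySem.List.enumerate (PySem.List.slice (PySem.Str.splitlines text) none (some max_rows)) 0)
    (-1)

-- ===== PRECONDITION & SPEC =====
def Spec_detect_moex_header_row_py (text : String) (max_rows : Int) (out : Int) : Prop := out = detect_moex_header_row_py_alt text max_rows
instance (text : String) (max_rows : Int) (out : Int) : Decidable (Spec_detect_moex_header_row_py text max_rows out) := by unfold Spec_detect_moex_header_row_py; infer_instance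

-- ===== CLAIM (what is proved, stated in full; the proofs are below) =====
def Claim_equal_detect_moex_header_row_py : Prop := ∀ (text : String) (max_rows : Int), Dom_detect_moex_header_row_py text max_rows → Spec_detect_moex_header_row_py text max_rows (detect_moex_header_row_py text max_rows)

-- ===== LEMMAS AND PROOFS =====

-- one-pass loop = first strong hit, else the stored weak index, else first weak hit, else 0
lemma pvLoopB_eq (L : List (Int × String)) (w : Int) (h : ∀ p ∈ L, 0 ≤ p.1) :
    pvLoopB L w =
      match pvLoop1A L with
      | some i => i
      | none => if 0 ≤ w then w else (pvLoop2A L).getD 0 := by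
  induction L generalizing w with
  | nil => simp [pvLoopB, pvLoop1A, pvLoop2A]
  | cons p rest ih =>
    obtain ⟨idx, line⟩ := p
    have hidx : 0 ≤ idx := h (idx, line) (by simp)
    have hrest : ∀ p ∈ rest, 0 ≤ p.1 := fun p hp => h p (by simp [hp])
    simp only [pvLoopB, pvLoop1A, pvLoop2A]
    by_cases hs : pvStrong (PySem.Str.upper line) = true
    · simp [hs]
    · simp only [hs, Bool.false_eq_true, if_false, ih _ hrest]
      cases hl1 : pvLoop1A rest with
      | some j => simp
      | none =>
        by_cases hw : 0 ≤ w
        · have : ¬ w < 0 := by omega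
          simp [this, hw]
        · have hw' : w < 0 := by omega
          by_cases hweak : PySem.Str.isIn "SECID" (PySem.Str.upper line) = true
          · simp at hweak
            simp [hw', hweak, hidx]
          · simp at hweak
            simp [hw', hweak, hw]

lemma enumerate_nonneg (xs : List String) :
    ∀ p ∈ PySem.List.enumerate xs 0, (0:Int) ≤ p.1 := by
  intro p hp
  rw [PySem.List.mem_enumerate_iff] at hp
  obtain ⟨k, hk, rfl⟩ := hp
  simp

-- ===== VERDICT (by name: the statement is the Claim_ definition above) =====
theorem detect_moex_header_row_py_spec : Claim_equal_detect_moex_header_row_py := by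
  intro text max_rows _
  unfold Spec_detect_moex_header_row_py detect_moex_header_row_py detect_moex_header_row_py_alt
  rw [pvLoopB_eq _ _ (enumerate_nonneg _)]
  cases h1 : pvLoop1A (PySem.List.enumerate (PySem.List.slice (PySem.Str.splitlines text) none (some max_rows)) 0) with
  | some i => simp [h1]
  | none =>
    simp only [h1, show ¬ (0:Int) ≤ -1 by omega, if_false]
    cases h2 : pvLoop2A (PySem.List.enumerate (PySem.List.slice (PySem.Str.splitlines text) none (some max_rows)) 0) with
    | none => simp
    | some v => simp
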